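-- pv_equiv track=rewrite | github.com/Noam-St/2022_Metazoan_mtDNA_Project | 04_Rearrangements_and_transcription/04_03_PRO-seq/utils.py | alter_cluster_model
-- ===== SOURCE A (Python) =====
-- def alter_cluster_model(gorder):
--     """
--     Receive a gene order, return True if it behaves according to the alternating gene clusters model.
--     Alternative clustering model - groups of more than 2+ protein coding genes that are alternating between the heavy and the light strand.
--
--     Parameters
--     ----------
--     gorder : list
--         List of genes in the exact order they appear on the mtDNA.
--
--     Returns
--     -------
--     : bool
--         True if the gorder is arranged in AGC and False if it isnt
--     """
--     # Remove tRNA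
--     gorder = [i for i in gorder if 'trn' not in i]
--     gcluster = []
--     cluster_count = 0
--     for gene in gorder:
--         # If the current cluster list is empty, add the gene to it
--         if gcluster == []:
--             gcluster.append(gene)
--             continue
--         # Check the current gene's strand and the last gene's strand
--         cur_strand = '-' not in gene
--         last_strand = '-' not in gcluster[-1]
--         # If the current gene is the same strand as the last gene, add to cluster and keep going, otherwise end cluster.
--         if cur_strand == last_strand:
--             gcluster.append(gene)
--         else:
--             if len(gcluster) > 1:
--                 cluster_count += 1
--             else:
--                 return False
--             gcluster = []
--             gcluster.append(gene)
--     if cluster_count >= 2: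
--         return True
--     else:
--         return False
-- ===== SOURCE B (Python) =====
-- def alter_cluster_model(gorder):
--     # Boundary-index view: find the positions where the strand flips among the
--     # non-tRNA genes, then check the gaps between consecutive flip positions.
--     strands = ['-' not in g for g in gorder if 'trn' not in g]
--     changes = [i + 1 for i, (a, b) in enumerate(zip(strands, strands[1:])) if a != b]
--     if len(changes) < 2:
--         return False
--     return all(b - a >= 2 for a, b in zip([0] + changes, changes))
-- ===== Notes on version B (the rewrite author's own statement) =====
-- stated objective: alternative
-- what changed: Replaces A's incremental cluster-list state machine by a boundary-index formulation: compute the positions where the strand flips (pairwise zip), then require at least two flips and a gap of at least 2 between consecutive flip positions (counting from 0).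
import Mathlib
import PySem

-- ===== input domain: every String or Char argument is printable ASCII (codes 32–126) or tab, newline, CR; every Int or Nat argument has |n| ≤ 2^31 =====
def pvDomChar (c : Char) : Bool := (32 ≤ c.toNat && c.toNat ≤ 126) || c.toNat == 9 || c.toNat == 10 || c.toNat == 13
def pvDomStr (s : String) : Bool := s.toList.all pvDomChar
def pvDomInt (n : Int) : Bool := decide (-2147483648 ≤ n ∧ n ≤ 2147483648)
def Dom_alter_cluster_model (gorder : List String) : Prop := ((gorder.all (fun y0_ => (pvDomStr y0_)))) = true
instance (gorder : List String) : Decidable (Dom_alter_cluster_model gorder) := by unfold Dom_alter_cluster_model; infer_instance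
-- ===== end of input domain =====

-- B replaces A's incremental cluster-list state machine by a boundary-index
-- formulation (positions of strand flips, then a gap check); objective: alternative.

-- ===== PORT A =====
-- the loop of A: state = (remaining genes, gcluster, cluster_count); early 'return False' = false
def alterLoopA : List String → List String → Int → Bool
  | [], _, cnt => decide (cnt ≥ 2)
  | gene :: rest, gcluster, cnt =>
    if gcluster = [] then
      alterLoopA rest (gcluster ++ [gene]) cnt
    else
      let cur_strand := !(PySem.Str.isIn "-" gene)
      let last_strand := !(PySem.Str.isIn "-" (gcluster.getLast!))
      if cur_strand == last_strand then
        alterLoopA rest (gcluster ++ [gene]) cnt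
      else
        if gcluster.length > 1 then
          alterLoopA rest [gene] (cnt + 1)
        else
          false

def alter_cluster_model (gorder : List String) : Bool :=
  let gorder := gorder.filter (fun i => !(PySem.Str.isIn "trn" i))
  alterLoopA gorder [] 0

-- ===== PORT B =====
def alter_cluster_model_alt (gorder : List String) : Bool :=
  let strands := (gorder.filter (fun g => !(PySem.Str.isIn "trn" g))).map
    (fun g => !(PySem.Str.isIn "-" g))
  -- changes = [i + 1 for i, (a, b) in enumerate(zip(strands, strands[1:])) if a != b]
  let changes := ((PySem.List.enumerate (strands.zip (PySem.List.slice strands (some 1) none))).filter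
      (fun p => p.2.1 != p.2.2)).map (fun p => p.1 + 1)
  if changes.length < 2 then false
  else (((0 : Int) :: changes).zip changes).all (fun p => decide (p.2 - p.1 ≥ 2))

-- ===== PRECONDITION & SPEC =====
def Spec_alter_cluster_model (gorder : List String) (out : Bool) : Prop := out = alter_cluster_model_alt gorder
instance (gorder : List String) (out : Bool) : Decidable (Spec_alter_cluster_model gorder out) := by unfold Spec_alter_cluster_model; infer_instance

-- ===== CLAIM (what is proved, stated in full; the proofs are below) =====
def Claim_equal_alter_cluster_model : Prop := ∀ (gorder : List String), Dom_alter_cluster_model gorder → Spec_alter_cluster_model gorder (alter_cluster_model gorder)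

-- ===== LEMMAS AND PROOFS =====

-- abstract form of A's loop: state = (last strand, current cluster length, count)
def aStr : List Bool → Bool → Nat → Int → Bool
  | [], _, _, cnt => decide (cnt ≥ 2)
  | s :: rest, last, k, cnt =>
    if s == last then aStr rest s (k + 1) cnt
    else if k > 1 then aStr rest s 1 (cnt + 1)
    else false

-- change positions of prev :: ss, the position of prev being i - 1
def chgPos : Bool → List Bool → Int → List Int
  | _, [], _ => []
  | prev, s :: ss, i => if prev != s then i :: chgPos s ss (i + 1) else chgPos s ss (i + 1)

-- gap check on a change-position list, lc = previous change position
def gapsOK : Int → List Int → Bool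
  | _, [] => true
  | lc, c :: cs => decide (c - lc ≥ 2) && gapsOK c cs

-- early-exit form combining gap check and count
def gapCnt : Int → Int → List Int → Bool
  | cnt, _, [] => decide (cnt ≥ 2)
  | cnt, lc, c :: cs => if c - lc ≥ 2 then gapCnt (cnt + 1) c cs else false

lemma getLast!_concat_str (l : List String) (x : String) : (l ++ [x]).getLast! = x := by
  cases l <;> simp [List.getLast!]

-- A's loop reduces to aStr on the strand pattern
lemma alterLoopA_eq_aStr (genes : List String) :
    ∀ (gc : List String) (cnt : Int), gc ≠ [] →
      alterLoopA genes gc cnt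
        = aStr (genes.map (fun g => !(PySem.Str.isIn "-" g)))
            (!(PySem.Str.isIn "-" (gc.getLast!))) gc.length cnt := by
  induction genes with
  | nil =>
    intro gc cnt h
    cases gc with
    | nil => exact absurd rfl h
    | cons a as => rfl
  | cons gene rest ih =>
    intro gc cnt h
    cases gc with
    | nil => exact absurd rfl h
    | cons a as =>
      simp only [alterLoopA, List.map, aStr, if_neg (List.cons_ne_nil a as)]
      by_cases hs : ((!(PySem.Str.isIn "-" gene)) == (!(PySem.Str.isIn "-" ((a :: as).getLast!)))) = true
      · rw [if_pos hs, if_pos hs, ih ((a :: as) ++ [gene]) cnt (by simp)]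
        rw [getLast!_concat_str]
        simp
      · rw [if_neg hs, if_neg hs]
        by_cases hl : (a :: as).length > 1
        · rw [if_pos hl, if_pos hl, ih [gene] (cnt + 1) (by simp)]
          simp [List.getLast!]
        · rw [if_neg hl, if_neg hl]

-- aStr in terms of change positions and a gap/count scan
lemma aStr_eq_gapCnt (ss : List Bool) :
    ∀ (prev : Bool) (k : Nat) (i cnt : Int),
      aStr ss prev k cnt = gapCnt cnt (i - k) (chgPos prev ss i) := by
  induction ss with
  | nil => intro prev k i cnt; rfl
  | cons s rest ih =>
    intro prev k i cnt
    by_cases hs : s = prev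
    · subst hs
      have : (s != s) = false := by simp
      simp only [aStr, chgPos, this, BEq.rfl, if_true, Bool.false_eq_true, if_false]
      rw [ih s (k + 1) (i + 1) cnt]
      congr 1
      push_cast
      ring
    · have h1 : (s == prev) = false := by simp [hs]
      have h2 : (prev != s) = true := by simp [Ne.symm hs]
      simp only [aStr, chgPos, h1, h2, Bool.false_eq_true, if_false, if_true, gapCnt]
      have hgap : i - (i - (k : Int)) = (k : Int) := by ring
      rw [hgap]
      by_cases hk : k > 1
      · rw [if_pos (by exact_mod_cast hk), if_pos (by exact_mod_cast hk)]
        rw [ih s 1 (i + 1) (cnt + 1)]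
        norm_num
      · rw [if_neg (by exact_mod_cast hk), if_neg (by exact_mod_cast hk)]

-- the early-exit scan equals gap check plus final count
lemma gapCnt_eq (cs : List Int) :
    ∀ (cnt lc : Int), gapCnt cnt lc cs = (gapsOK lc cs && decide (cnt + cs.length ≥ 2)) := by
  induction cs with
  | nil => intro cnt lc; simp [gapCnt, gapsOK]
  | cons c cs ih =>
    intro cnt lc
    simp only [gapCnt, gapsOK]
    by_cases h : c - lc ≥ 2
    · rw [if_pos h, ih (cnt + 1) c]
      have : ((cnt + 1) + (cs.length : Int) ≥ 2) = (cnt + ((c :: cs).length : Int) ≥ 2) := by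
        simp; constructor <;> intro <;> omega
      simp [h, this]
    · rw [if_neg h]
      simp [h]

-- B's zip-based gap test equals gapsOK
lemma zip_all_eq_gapsOK (cs : List Int) :
    ∀ (lc : Int), (((lc :: cs).zip cs).all (fun p => decide (p.2 - p.1 ≥ 2))) = gapsOK lc cs := by
  induction cs with
  | nil => intro lc; rfl
  | cons c cs ih =>
    intro lc
    simp only [List.zip_cons_cons, List.all_cons, gapsOK, ih c]

-- B's enumerate/zip computation of change positions equals chgPos
lemma changes_eq_chgPos (rest : List Bool) :
    ∀ (prev : Bool) (s : Int),
      ((PySem.List.enumerate ((prev :: rest).zip rest) s).filter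
          (fun p => p.2.1 != p.2.2)).map (fun p => p.1 + 1)
        = chgPos prev rest (s + 1) := by
  induction rest with
  | nil => intro prev s; rfl
  | cons r rs ih =>
    intro prev s
    simp only [List.zip_cons_cons, PySem.List.enumerate_cons, List.filter_cons, chgPos]
    by_cases h : (prev != r) = true
    · rw [if_pos h, if_pos h]
      simp only [List.map_cons, ih r (s + 1)]
    · rw [if_neg h, if_neg h]
      exact ih r (s + 1)

lemma final_form (cs : List Int) :
    (gapsOK 0 cs && decide ((0 : Int) + cs.length ≥ 2))
      = (if cs.length < 2 then false
         else (((0 : Int) :: cs).zip cs).all (fun p => decide (p.2 - p.1 ≥ 2))) := by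
  rw [zip_all_eq_gapsOK]
  by_cases h : cs.length < 2
  · rw [if_pos h]
    have : decide ((0 : Int) + (cs.length : Int) ≥ 2) = false := by simp; omega
    rw [this, Bool.and_false]
  · rw [if_neg h]
    have : decide ((0 : Int) + (cs.length : Int) ≥ 2) = true := by simp; omega
    rw [this, Bool.and_true]

theorem equal_all (gorder : List String) :
    alter_cluster_model gorder = alter_cluster_model_alt gorder := by
  unfold alter_cluster_model alter_cluster_model_alt
  simp only [PySem.List.slice_from_one]
  cases hg : gorder.filter (fun i => !(PySem.Str.isIn "trn" i)) with
  | nil => rfl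
  | cons g gs =>
    simp only [List.map, List.tail_cons]
    have hA : alterLoopA (g :: gs) [] 0 = alterLoopA gs [g] 0 := rfl
    rw [hA, alterLoopA_eq_aStr gs [g] 0 (by simp)]
    simp only [List.getLast!, List.length_cons, List.length_nil]
    rw [aStr_eq_gapCnt (gs.map (fun g => !(PySem.Str.isIn "-" g))) _ 1 1 0]
    rw [gapCnt_eq]
    rw [changes_eq_chgPos (gs.map (fun g => !(PySem.Str.isIn "-" g))) (!(PySem.Str.isIn "-" g)) 0]
    have hfin := final_form (chgPos (!(PySem.Str.isIn "-" g)) (gs.map (fun g => !(PySem.Str.isIn "-" g))) 1)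
    norm_num at hfin ⊢
    exact hfin

-- ===== VERDICT (by name: the statement is the Claim_ definition above) =====
theorem alter_cluster_model_spec : Claim_equal_alter_cluster_model := by
  intro gorder _
  unfold Spec_alter_cluster_model
  exact equal_all gorder
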